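-- pv_equiv track=rewrite | github.com/RTroshin/Codewars | Python/7 kyu/Mutate My Strings.py | mutate_my_strings
-- ===== SOURCE A (Python) =====
-- def mutate_my_strings(s1, s2):
--     res = [s1]
--
--     for i in range(len(s1)):
--         if s1[i] != s2[i]:
--             s1 = list(s1)
--             s1[i] = s2[i]
--             s1 = ''.join(s1)
--             res.append(s1)
--
--     return '\n'.join(res) + '\n'
-- ===== SOURCE B (Python) =====
-- def mutate_my_strings(s1, s2):
--     diffs = [i for i in range((len(s1))) if s1[i] != s2[i]]
--     res = [s1] + [s2[:i + 1] + s1[i + 1:] for i in diffs]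
--     return '\n'.join(res) + '\n'
-- ===== Notes on version B (the rewrite author's own statement) =====
-- stated objective: alternative
-- what changed: B never mutates or rebuilds a buffer: after fixing all differing positions up to i the string is exactly s2[:i+1] + s1[i+1:], so each log line is produced independently by this closed-form slice over the precomputed diff indices, replacing A's stateful scan that rewrites and rejoins the whole string at each change.
import Mathlib
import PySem

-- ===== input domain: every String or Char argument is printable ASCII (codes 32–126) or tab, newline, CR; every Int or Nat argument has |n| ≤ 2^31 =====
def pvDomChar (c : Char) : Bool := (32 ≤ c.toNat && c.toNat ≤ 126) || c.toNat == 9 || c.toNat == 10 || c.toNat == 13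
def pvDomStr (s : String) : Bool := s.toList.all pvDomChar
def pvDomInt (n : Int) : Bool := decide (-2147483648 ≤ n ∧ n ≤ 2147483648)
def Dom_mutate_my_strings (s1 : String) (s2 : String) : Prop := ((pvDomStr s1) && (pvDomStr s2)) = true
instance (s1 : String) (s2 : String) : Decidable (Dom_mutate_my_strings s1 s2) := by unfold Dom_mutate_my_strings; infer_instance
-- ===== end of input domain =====

-- B replaces A's stateful rebuild-and-rejoin scan by closed-form slicing: each log line is
-- s2[:i+1] + s1[i+1:] for a differing index i, computed independently (alternative, same cost class).

-- ===== PORT A =====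
-- A: res = [s1]; for i in range(len(s1)): if s1[i] != s2[i]: rebuild s1 with s1[i] = s2[i], append.
-- Strings are carried as char lists (PySem.Chars convention); indexing s1[i]/s2[i] is ported
-- with getD (in range for every input admitted by Pre_); '\n'.join is PySem.Chars.join.
def mutate_my_strings (s1 : String) (s2 : String) : String :=
  let s2c := s2.toList
  let step : (List Char × List (List Char)) → Nat → (List Char × List (List Char)) :=
    fun st i =>
      if st.1.getD i ' ' ≠ s2c.getD i ' ' then
        let cur' := st.1.set i (s2c.getD i ' ')
        (cur', st.2 ++ [cur'])
      else st
  let r := (List.range s1.toList.length).foldl step (s1.toList, [s1.toList])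
  String.ofList (PySem.Chars.join ['\n'] r.2 ++ ['\n'])

-- ===== PORT B =====
-- Source B: diffs comprehension, then res = [s1] + [s2[:i+1] + s1[i+1:] for i in diffs].
-- The slices s2[:i+1] / s1[i+1:] are ported as take / drop on the char lists (indices are ≥ 0).
def mutate_my_strings_alt (s1 : String) (s2 : String) : String :=
  let s1c := s1.toList
  let s2c := s2.toList
  let diffs := (List.range s1c.length).filter (fun i => s1c.getD i ' ' ≠ s2c.getD i ' ')
  let res := [s1c] ++ diffs.map (fun i => s2c.take (i + 1) ++ s1c.drop (i + 1))
  String.ofList (PySem.Chars.join ['\n'] res ++ ['\n'])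

-- ===== PRECONDITION & SPEC =====
-- Pre_ excludes len(s2) < len(s1), on which both Pythons raise IndexError at s2[i].
def Pre_mutate_my_strings (s1 : String) (s2 : String) : Prop := s1.toList.length ≤ s2.toList.length
instance (s1 : String) (s2 : String) : Decidable (Pre_mutate_my_strings s1 s2) := by unfold Pre_mutate_my_strings; infer_instance
def pvWitness_mutate_my_strings : String × String := ("abc", "axc")

def Spec_mutate_my_strings (s1 : String) (s2 : String) (out : String) : Prop := out = mutate_my_strings_alt s1 s2
instance (s1 : String) (s2 : String) (out : String) : Decidable (Spec_mutate_my_strings s1 s2 out) := by unfold Spec_mutate_my_strings; infer_instance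

-- ===== CLAIM (what is proved, stated in full; the proofs are below) =====
def Claim_equal_mutate_my_strings : Prop := ∀ (s1 : String) (s2 : String), Dom_mutate_my_strings s1 s2 → Pre_mutate_my_strings s1 s2 → Spec_mutate_my_strings s1 s2 (mutate_my_strings s1 s2)

-- ===== LEMMAS AND PROOFS =====

-- Invariant of A's scan: after processing range n (n ≤ |s1| ≤ |s2|) the buffer is
-- s2[:n] ++ s1[n:] and the log is res0 ++ one closed-form snapshot per differing index < n.
theorem foldA_invariant (s1c s2c : List Char) (h : s1c.length ≤ s2c.length) (res0 : List (List Char)) :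
    ∀ n, n ≤ s1c.length →
    (List.range n).foldl (fun (st : List Char × List (List Char)) i =>
        if st.1.getD i ' ' ≠ s2c.getD i ' ' then
          ((st.1.set i (s2c.getD i ' ')), st.2 ++ [st.1.set i (s2c.getD i ' ')])
        else st) (s1c, res0)
      = (s2c.take n ++ s1c.drop n,
         res0 ++ ((List.range n).filter (fun i => s1c.getD i ' ' ≠ s2c.getD i ' ')).map
           (fun i => s2c.take (i + 1) ++ s1c.drop (i + 1))) := by
  intro n
  induction n with
  | zero => intro _; simp
  | succ n ih =>
    intro hn
    have hn' : n ≤ s1c.length := Nat.le_of_succ_le hn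
    have hns1 : n < s1c.length := hn
    have hns2 : n < s2c.length := lt_of_lt_of_le hns1 h
    rw [List.range_succ, List.foldl_append, ih hn', List.filter_append, List.map_append]
    have htklen : (s2c.take n).length = n := by
      simp [List.length_take, Nat.min_eq_left (Nat.le_of_lt hns2)]
    -- the buffer's char at n is still s1c's
    have hget : (s2c.take n ++ s1c.drop n).getD n ' ' = s1c.getD n ' ' := by
      rw [List.getD, List.getD, List.getElem?_append_right (by omega), htklen,
        Nat.sub_self, List.getElem?_drop, Nat.add_zero]
    -- setting position n advances the take/drop split
    have hset : (s2c.take n ++ s1c.drop n).set n (s2c.getD n ' ')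
        = s2c.take (n + 1) ++ s1c.drop (n + 1) := by
      rw [List.set_append_right _ _ (by omega), htklen, Nat.sub_self]
      have hd : s1c.drop n = s1c[n] :: s1c.drop (n + 1) := List.drop_eq_getElem_cons hns1
      have ht : s2c.take (n + 1) = s2c.take n ++ [s2c[n]] := by
        rw [List.take_add_one, List.getElem?_eq_getElem hns2]; rfl
      rw [hd, ht, List.set_cons_zero, List.append_assoc]
      simp [List.getD, List.getElem?_eq_getElem hns2]
    by_cases hc : s1c.getD n ' ' ≠ s2c.getD n ' '
    · have hc' : (List.take n s2c ++ List.drop n s1c).getD n ' ' ≠ s2c.getD n ' ' := by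
        rw [hget]; exact hc
      rw [List.foldl_cons, List.foldl_nil, if_pos hc', hset, List.filter_cons,
        if_pos (by simpa using hc)]
      simp [List.append_assoc]
    · rw [not_not] at hc
      have helem : s1c[n]'hns1 = s2c[n]'hns2 := by
        have h' := hc
        simp [List.getD, hns1, hns2] at h'
        exact h'
      have hsame : List.take n s2c ++ List.drop n s1c
          = List.take (n + 1) s2c ++ List.drop (n + 1) s1c := by
        rw [List.drop_eq_getElem_cons hns1, helem, List.take_add_one,
          List.getElem?_eq_getElem hns2]
        simp only [Option.toList_some, List.append_assoc, List.singleton_append]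
      have hc' : ¬ ((List.take n s2c ++ List.drop n s1c).getD n ' ' ≠ s2c.getD n ' ') := by
        rw [hget]; simpa using hc
      rw [List.foldl_cons, List.foldl_nil, if_neg hc', List.filter_cons,
        if_neg (by simpa using hc)]
      simp [hsame]

-- ===== VERDICT (by name: the statement is the Claim_ definition above) =====
theorem mutate_my_strings_spec : Claim_equal_mutate_my_strings := by
  intro s1 s2 _ hpre
  unfold Spec_mutate_my_strings mutate_my_strings mutate_my_strings_alt
  simp only []
  rw [foldA_invariant s1.toList s2.toList hpre [s1.toList] s1.toList.length le_rfl]
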